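-- pv_equiv track=rewrite | github.com/IsaiahDupree/tactile-comm-device | player_simple_working_directory_v7/upload_human_g.py | next_slot
-- ===== SOURCE A (Python) =====
-- def next_slot(existing_names):
--     used = set()
--     for n in existing_names:
--         u = n.upper()
--         if u.endswith(".MP3") and len(u) == 7 and u[:3].isdigit():
--             used.add(int(u[:3]))
--     for i in range(1, 1000):
--         if i not in used: return f"{i:03d}"
--     return "999"
-- ===== SOURCE B (Python) =====
-- def next_slot(existing_names):
--     used = []
--     for n in existing_names:
--         u = n.upper()
--         if u.endswith(".MP3") and len(u) == 7 and u[:3].isdigit():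
--             used.append(int(u[:3]))
--     cand = 1
--     for v in sorted(used):
--         if v == cand:
--             cand += 1
--         elif v > cand:
--             break
--     return f"{cand:03d}" if cand <= 999 else "999"
-- ===== Notes on version B (the rewrite author's own statement) =====
-- stated objective: alternative
-- what changed: Replaces A's membership probe of every candidate 1..999 against the used-set with a single gap walk over the sorted list of used slot numbers (advance the candidate exactly on a match, break on the first larger value), capping at '999'.
import Mathlib
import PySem

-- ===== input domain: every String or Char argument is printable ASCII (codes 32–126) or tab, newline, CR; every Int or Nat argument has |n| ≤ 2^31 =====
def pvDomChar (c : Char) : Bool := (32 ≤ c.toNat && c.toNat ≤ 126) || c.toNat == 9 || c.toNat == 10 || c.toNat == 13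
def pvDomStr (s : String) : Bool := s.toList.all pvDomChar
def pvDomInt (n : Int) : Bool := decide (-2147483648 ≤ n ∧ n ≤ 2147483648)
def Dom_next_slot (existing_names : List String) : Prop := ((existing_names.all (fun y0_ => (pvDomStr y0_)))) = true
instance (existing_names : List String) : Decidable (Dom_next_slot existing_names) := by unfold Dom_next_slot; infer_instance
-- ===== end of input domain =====

-- B replaces A's membership probe of every candidate 1..999 with a single gap walk
-- over the sorted used-slot list (alternative decomposition; return values proved equal).

-- ===== PORT A =====
-- shared filter of both Pythons' identical first loop: the slot number of a name, if any.
-- ('int(u[:3])' is ported as (ofStr? _).getD 0; the default is unreachable since the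
-- guard requires strIsdigit, under which ofStr? returns some on the ASCII domain.)
def slotOf? (n : String) : Option Int :=
  let u := PySem.Str.upper n
  if PySem.Str.endswith u ".MP3" && (PySem.Str.len u == (7 : Int))
      && PySem.Str.strIsdigit (PySem.Str.slice u none (some 3))
  then some ((PySem.Int.ofStr? (PySem.Str.slice u none (some 3))).getD 0)
  else none

-- f"{i:03d}" for the nonnegative i both programs format (slot numbers are ≥ 1)
def pad3 (i : Int) : String := PySem.Str.zfill (PySem.Int.toStr i) 3

-- 'for i in range(1, 1000): if i not in used: return f"{i:03d}"' / 'return "999"'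
def scanA : List Int → PySem.Set Int → String
  | [], _ => "999"
  | i :: rest, s => if PySem.Set.contains s i then scanA rest s else pad3 i

def next_slot (existing_names : List String) : String :=
  let used : PySem.Set Int := existing_names.foldl (fun s n =>
    match slotOf? n with
    | some v => PySem.Set.add s v
    | none => s) PySem.Set.empty
  scanA (PySem.List.pyRange 1 1000 1) used

-- ===== PORT B =====
-- 'for v in sorted(used): if v == cand: cand += 1; elif v > cand: break'
def walkB : Int → List Int → Int
  | c, [] => c
  | c, v :: rest => if v = c then walkB (c + 1) rest
      else if c < v then c
      else walkB c rest

def next_slot_alt (existing_names : List String) : String :=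
  let used : List Int := existing_names.foldl (fun acc n =>
    match slotOf? n with
    | some v => acc ++ [v]
    | none => acc) []
  let cand := walkB 1 (PySem.List.sorted used (fun x => x) false)
  if cand ≤ 999 then pad3 cand else "999"

-- ===== PRECONDITION & SPEC =====
def Spec_next_slot (existing_names : List String) (out : String) : Prop := out = next_slot_alt existing_names
instance (existing_names : List String) (out : String) : Decidable (Spec_next_slot existing_names out) := by unfold Spec_next_slot; infer_instance

-- ===== CLAIM (what is proved, stated in full; the proofs are below) =====
def Claim_equal_next_slot : Prop := ∀ (existing_names : List String), Dom_next_slot existing_names → Spec_next_slot existing_names (next_slot existing_names)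

-- ===== LEMMAS AND PROOFS =====

theorem le_walkB (l : List Int) : ∀ c, c ≤ walkB c l := by
  induction l with
  | nil => intro c; simp [walkB]
  | cons v rest ih =>
      intro c
      simp only [walkB]
      split_ifs with h1 h2
      · exact le_trans (by omega) (ih (c + 1))
      · exact le_refl c
      · exact ih c

theorem walkB_not_mem (l : List Int) : ∀ c, l.Pairwise (· ≤ ·) → walkB c l ∉ l := by
  induction l with
  | nil => intro c _; simp
  | cons v rest ih =>
      intro c hp
      rcases List.pairwise_cons.mp hp with ⟨hv, hrest⟩
      simp only [walkB]
      split_ifs with h1 h2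
      · intro hmem
        rcases List.mem_cons.mp hmem with h | h
        · have := le_walkB rest (c + 1); omega
        · exact ih (c + 1) hrest h
      · intro hmem
        rcases List.mem_cons.mp hmem with h | h
        · omega
        · have := hv _ h; omega
      · intro hmem
        rcases List.mem_cons.mp hmem with h | h
        · have := le_walkB rest c; omega
        · exact ih c hrest h

theorem walkB_min (l : List Int) : ∀ c, l.Pairwise (· ≤ ·) →
    ∀ n, c ≤ n → n < walkB c l → n ∈ l := by
  induction l with
  | nil => intro c _ n h1 h2; simp [walkB] at h2; omega
  | cons v rest ih =>
      intro c hp n hcn hlt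
      rcases List.pairwise_cons.mp hp with ⟨_, hrest⟩
      simp only [walkB] at hlt
      split_ifs at hlt with h1 h2
      · by_cases hnc : n = c
        · subst hnc; exact List.mem_cons.mpr (Or.inl h1.symm)
        · exact List.mem_cons.mpr (Or.inr (ih (c + 1) hrest n (by omega) hlt))
      · omega
      · exact List.mem_cons.mpr (Or.inr (ih c hrest n hcn hlt))

-- the two accumulation loops collect the same membership
theorem fold_mem (names : List String) : ∀ (s : PySem.Set Int) (l : List Int),
    (∀ i, i ∈ s ↔ i ∈ l) →
    ∀ i, i ∈ names.foldl (fun s n => match slotOf? n with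
            | some v => PySem.Set.add s v
            | none => s) s
        ↔ i ∈ names.foldl (fun acc n => match slotOf? n with
            | some v => acc ++ [v]
            | none => acc) l := by
  induction names with
  | nil => intro s l h i; simpa using h i
  | cons n rest ih =>
      intro s l h i
      simp only [List.foldl_cons]
      cases hslot : slotOf? n with
      | none => exact ih s l h i
      | some v =>
          refine ih _ _ (fun j => ?_) i
          rw [PySem.Set.mem_add]
          simp [h j, or_comm]

theorem scanA_eq (s : PySem.Set Int) (L : List Int)
    (hmem : ∀ i, PySem.Set.contains s i = true ↔ i ∈ L)
    (hp : L.Pairwise (· ≤ ·)) :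
    ∀ k a, (1000 - a).toNat = k → 1 ≤ a → a ≤ walkB 1 L →
      scanA (PySem.List.pyRange a 1000 1) s
        = (if walkB 1 L ≤ 999 then pad3 (walkB 1 L) else "999") := by
  intro k
  induction k with
  | zero =>
      intro a hk h1 hle
      have hb : (1000 : Int) ≤ a := by omega
      rw [PySem.List.pyRange_one_eq_nil hb]
      have : ¬ walkB 1 L ≤ 999 := by omega
      simp [scanA, this]
  | succ m ih =>
      intro a hk h1 hle
      have hab : a < 1000 := by omega
      rw [PySem.List.pyRange_one_cons hab]
      by_cases heq : a = walkB 1 L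
      · have hnot : a ∉ L := heq ▸ walkB_not_mem L 1 hp
        have hc : PySem.Set.contains s a = false := by
          by_contra h
          exact hnot ((hmem a).mp (by simpa using h))
        have h999 : walkB 1 L ≤ 999 := by omega
        have hstep : scanA (a :: PySem.List.pyRange (a + 1) 1000 1) s = pad3 a := by
          simp only [scanA, hc, Bool.false_eq_true, if_false]
        rw [hstep, heq, if_pos h999]
      · have hlt : a < walkB 1 L := lt_of_le_of_ne hle heq
        have hin : a ∈ L := walkB_min L 1 hp a h1 hlt
        have hc : PySem.Set.contains s a = true := (hmem a).mpr hin
        rw [scanA, hc, if_pos rfl]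
        exact ih (a + 1) (by omega) (by omega) (by omega)

-- ===== VERDICT (by name: the statement is the Claim_ definition above) =====
theorem next_slot_spec : Claim_equal_next_slot := by
  intro names _
  unfold Spec_next_slot next_slot next_slot_alt
  set s := names.foldl (fun s n => match slotOf? n with
      | some v => PySem.Set.add s v
      | none => s) PySem.Set.empty with hs
  set l := names.foldl (fun acc n => match slotOf? n with
      | some v => acc ++ [v]
      | none => acc) ([] : List Int) with hl
  set L := PySem.List.sorted l (fun x => x) false with hL
  have hmem : ∀ i, PySem.Set.contains s i = true ↔ i ∈ L := by
    intro i
    rw [PySem.Set.contains_iff, hL, PySem.List.mem_sorted]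
    exact fold_mem names PySem.Set.empty [] (by simp [PySem.Set.empty]) i
  have hp : L.Pairwise (· ≤ ·) := by
    have := PySem.List.sorted_pairwise (xs := l) (key := fun x : Int => x)
    simpa [hL] using this
  exact scanA_eq s L hmem hp ((1000 : Int) - 1).toNat 1 rfl (by omega) (le_walkB L 1)
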